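-- pv_equiv track=rewrite | github.com/CuriousCactus/PoemAnalyser | old/tk_colouring_3.py | phletting
-- ===== SOURCE A (Python) =====
-- vowels=["i",
-- "A",
-- "O",
-- "u",
-- "3",
-- "I",
-- "e",
-- "&",
-- "V",
-- "0",
-- "U",
-- "@",
-- "eI",
-- "aI",
-- "oI",
-- "@U",
-- "aU",
-- "I@",
-- "e@",
-- "u@"]
--
-- cons=["p",
-- "b",
-- "t",
-- "d",
-- "k",
-- "m",
-- "n",
-- "l",
-- "r",
-- "f",
-- "v",
-- "s",
-- "z",
-- "h",
-- "w",
-- "g",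
-- "tS",
-- "dZ",
-- "9",
-- "T",
-- "D",
-- "S",
-- "Z",
-- "j",
-- "2",
-- "N"]
--
-- def phletting(phsyl):
--     scons=sorted(cons, key=len)
--     scons.reverse()
--     svowels=sorted(vowels, key=len)
--     svowels.reverse()
--     s=scons+svowels
--     phlets=[]
--     a=0
--     while a< len(phsyl):
--         out =0
--         for phlet in s:
--             if phlet == phsyl[a:a+len(phlet)]:
--                 out = 1
--                 break
--         if out == 1:
--             a=a+len(phlet)
--             phlets.append(phlet)
--         else:
--             a=a+len(phlet)
--     return phlets
-- ===== SOURCE B (Python) =====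
-- _TWO = {"tS", "dZ", "eI", "aI", "oI", "@U", "aU", "I@", "e@", "u@"}
-- _ONE = {"p", "b", "t", "d", "k", "m", "n", "l", "r", "f", "v", "s", "z", "h",
--         "w", "g", "9", "T", "D", "S", "Z", "j", "2", "N",
--         "i", "A", "O", "u", "3", "I", "e", "&", "V", "0", "U", "@"}
--
--
-- def phletting(phsyl):
--     phlets = []
--     i = 0
--     n = len(phsyl)
--     while i < n:
--         two = phsyl[i:i + 2]
--         if two in _TWO:
--             phlets.append(two)
--             i += 2
--         elif phsyl[i] in _ONE:
--             phlets.append(phsyl[i])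
--             i += 1
--         else:
--             i += 1
--     return phlets
-- ===== Notes on version B (the rewrite author's own statement) =====
-- stated objective: faster
-- what changed: Replaced A's per-call sorting of the symbol lists and the inner linear scan over all 46 symbols at every position by two precomputed length-partitioned symbol sets (2-char and 1-char), so each position is decided by two O(1) set lookups in a single left-to-right pass.
import Mathlib
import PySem

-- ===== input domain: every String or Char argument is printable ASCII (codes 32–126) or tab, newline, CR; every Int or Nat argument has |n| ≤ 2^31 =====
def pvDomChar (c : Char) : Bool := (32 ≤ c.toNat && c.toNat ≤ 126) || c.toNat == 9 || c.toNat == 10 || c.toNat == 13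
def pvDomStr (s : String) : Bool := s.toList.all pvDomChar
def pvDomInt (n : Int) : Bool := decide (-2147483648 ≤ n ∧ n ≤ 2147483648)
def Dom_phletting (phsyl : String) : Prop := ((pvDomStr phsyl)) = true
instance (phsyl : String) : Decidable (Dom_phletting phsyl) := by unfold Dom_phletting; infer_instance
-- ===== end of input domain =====

-- B replaces A's sort + inner 46-symbol linear scan per position by two precomputed
-- length-partitioned symbol sets and a single left-to-right pass (objective: simpler/idiomatic).

-- B replaces A's sort + inner 46-symbol linear scan at every position by two precomputed
-- length-partitioned symbol sets and a single left-to-right pass (objective: simpler/idiomatic).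

-- ===== PORT A =====
def pvVowels : List String :=
  ["i","A","O","u","3","I","e","&","V","0","U","@","eI","aI","oI","@U","aU","I@","e@","u@"]
def pvCons : List String :=
  ["p","b","t","d","k","m","n","l","r","f","v","s","z","h","w","g","tS","dZ","9","T","D","S","Z","j","2","N"]

-- s = scons + svowels: sorted(…, key=len) (stable ascending), then list.reverse, concatenated
def pvS : List String :=
  (PySem.List.sorted pvCons (fun w => PySem.Str.len w) false).reverse ++
  (PySem.List.sorted pvVowels (fun w => PySem.Str.len w) false).reverse

-- the inner 'for phlet in s: if phlet == phsyl[a:a+len(phlet)]: out = 1; break':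
-- first phlet of s whose characters equal the slice phsyl[a:a+len(phlet)]
def pvFind : List String → List Char → Nat → Option String
  | [], _, _ => none
  | phlet :: rest, l, a =>
    if phlet.toList = PySem.List.slice l (some (a : Int)) (some ((a : Int) + (phlet.toList.length : Int)))
    then some phlet else pvFind rest l a

-- the next two lemmas are cited by pvLoopA's decreasing_by (termination only)
lemma pvFind_mem (s : List String) (l : List Char) (a : Nat) (p : String)
    (h : pvFind s l a = some p) : p ∈ s := by
  induction s with
  | nil => simp [pvFind] at h
  | cons q rest ih =>
    rw [pvFind] at h
    split at h
    · simp_all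
    · exact List.mem_cons_of_mem _ (ih h)

lemma pvS_pos : ∀ p ∈ pvS, 0 < p.toList.length := by decide

-- the while-loop; in the no-match branch the leaked loop variable phlet is the LAST
-- element of s, "i", of length 1, so Python's 'a = a + len(phlet)' is a + 1 there
def pvLoopA (l : List Char) (a : Nat) (phlets : List String) : List String :=
  if _h : a < l.length then
    match hm : pvFind pvS l a with
    | some phlet => pvLoopA l (a + phlet.toList.length) (phlets ++ [phlet])
    | none => pvLoopA l (a + 1) phlets
  else phlets
termination_by l.length - a
decreasing_by
  · have := pvS_pos _ (pvFind_mem _ _ _ _ hm); omega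
  · omega

def phletting (phsyl : String) : List String := pvLoopA phsyl.toList 0 []

-- ===== PORT B =====
def pvTwo : PySem.Set String :=
  PySem.Set.ofList ["tS","dZ","eI","aI","oI","@U","aU","I@","e@","u@"]
def pvOne : PySem.Set String :=
  PySem.Set.ofList ["p","b","t","d","k","m","n","l","r","f","v","s","z","h","w","g","9","T","D","S","Z","j","2","N",
                    "i","A","O","u","3","I","e","&","V","0","U","@"]

-- Source B's while-loop: try the two-character slice against _TWO, then the single
-- character against _ONE, else skip one character
def pvGoB : List Char → List String
  | [] => []
  | [c1] => if String.ofList [c1] ∈ pvOne then [String.ofList [c1]] else []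
  | c1 :: c2 :: rest =>
    if String.ofList [c1, c2] ∈ pvTwo then String.ofList [c1, c2] :: pvGoB rest
    else if String.ofList [c1] ∈ pvOne then String.ofList [c1] :: pvGoB (c2 :: rest)
    else pvGoB (c2 :: rest)

def phletting_alt (phsyl : String) : List String := pvGoB phsyl.toList

-- ===== PRECONDITION & SPEC =====
def Spec_phletting (phsyl : String) (out : List String) : Prop := out = phletting_alt phsyl
instance (phsyl : String) (out : List String) : Decidable (Spec_phletting phsyl out) := by unfold Spec_phletting; infer_instance

-- ===== CLAIM (what is proved, stated in full; the proofs are below) =====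
def Claim_equal_phletting : Prop := ∀ (phsyl : String), Dom_phletting phsyl → Spec_phletting phsyl (phletting phsyl)

-- ===== LEMMAS AND PROOFS =====

lemma pvS_eval : pvS = (["dZ","tS"] ++ ["N","2","j","Z","S","D","T","9","g","w","h","z","s","v","f","r","l","n","m","k","d","t","b","p"]) ++ (["u@","e@","I@","aU","@U","oI","aI","eI"] ++ ["@","U","0","V","&","e","I","3","u","O","A","i"]) := by decide

lemma pvFind_append (xs ys : List String) (l : List Char) (a : Nat) :
    pvFind (xs ++ ys) l a = (pvFind xs l a).orElse (fun _ => pvFind ys l a) := by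
  induction xs with
  | nil => simp [pvFind]
  | cons p rest ih => rw [List.cons_append, pvFind, pvFind]; split <;> simp [ih]

lemma pvFind_singles (syms : List String) (h1 : ∀ p ∈ syms, ∃ d, p.toList = [d])
    (l : List Char) (a : Nat) (c : Char) (t : List Char) (h : l.drop a = c :: t) :
    pvFind syms l a = if String.ofList [c] ∈ syms then some (String.ofList [c]) else none := by
  induction syms with
  | nil => simp [pvFind]
  | cons p rest ih =>
    obtain ⟨d, hd⟩ := h1 p (by simp)
    have hrest := ih (fun q hq => h1 q (by simp [hq]))
    rw [pvFind, PySem.List.slice_natCast_add, h, hd]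
    by_cases hdc : d = c
    · subst hdc
      have hp : p = String.ofList [d] := by rw [← hd, String.ofList_toList]
      simp [hp]
    · have hne : String.ofList [c] ≠ p := by
        intro he
        have := congrArg String.toList he
        simp [hd] at this
        exact hdc this.symm
      simp [List.take_succ_cons, hdc, hrest, hne]

lemma pvFind_doubles_nil (syms : List String) (h1 : ∀ p ∈ syms, ∃ d e, p.toList = [d, e])
    (l : List Char) (a : Nat) (c : Char) (h : l.drop a = [c]) :
    pvFind syms l a = none := by
  induction syms with
  | nil => simp [pvFind]
  | cons p rest ih =>
    obtain ⟨d, e, hd⟩ := h1 p (by simp)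
    have hrest := ih (fun q hq => h1 q (by simp [hq]))
    rw [pvFind, PySem.List.slice_natCast_add, h, hd]
    simp [hrest]

lemma pvFind_doubles (syms : List String) (h1 : ∀ p ∈ syms, ∃ d e, p.toList = [d, e])
    (l : List Char) (a : Nat) (c c2 : Char) (t : List Char) (h : l.drop a = c :: c2 :: t) :
    pvFind syms l a = if String.ofList [c, c2] ∈ syms then some (String.ofList [c, c2]) else none := by
  induction syms with
  | nil => simp [pvFind]
  | cons p rest ih =>
    obtain ⟨d, e, hd⟩ := h1 p (by simp)
    have hrest := ih (fun q hq => h1 q (by simp [hq]))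
    rw [pvFind, PySem.List.slice_natCast_add, h, hd]
    by_cases hdc : d = c ∧ e = c2
    · obtain ⟨h1', h2'⟩ := hdc; subst h1'; subst h2'
      have hp : p = String.ofList [d, e] := by rw [← hd, String.ofList_toList]
      simp [hp, List.take_succ_cons]
    · have hne : String.ofList [c, c2] ≠ p := by
        intro he
        have := congrArg String.toList he
        simp [hd] at this
        exact hdc ⟨this.1.symm, this.2.symm⟩
      simp [hrest, hne]
      intro h1' h2'
      exact absurd ⟨h1', h2'⟩ hdc

lemma mem_pvTwo_iff (x : String) : x ∈ pvTwo ↔ x ∈ (["dZ","tS"] : List String) ∨ x ∈ (["u@","e@","I@","aU","@U","oI","aI","eI"] : List String) := by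
  rw [pvTwo, PySem.Set.mem_ofList, ← List.mem_append]
  exact List.Perm.mem_iff (by decide)

lemma mem_pvOne_iff (x : String) : x ∈ pvOne ↔ x ∈ (["N","2","j","Z","S","D","T","9","g","w","h","z","s","v","f","r","l","n","m","k","d","t","b","p"] : List String) ∨ x ∈ (["@","U","0","V","&","e","I","3","u","O","A","i"] : List String) := by
  rw [pvOne, PySem.Set.mem_ofList, ← List.mem_append]
  exact List.Perm.mem_iff (by decide)

lemma pvDisj (c c2 : Char) (h : String.ofList [c, c2] ∈ (["u@","e@","I@","aU","@U","oI","aI","eI"] : List String)) :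
    String.ofList [c] ∉ (["N","2","j","Z","S","D","T","9","g","w","h","z","s","v","f","r","l","n","m","k","d","t","b","p"] : List String) := by
  simp only [List.mem_cons, List.not_mem_nil, or_false] at h
  rcases h with h | h | h | h | h | h | h | h <;>
    (have := congrArg String.toList h; simp at this; obtain ⟨h1, -⟩ := this; subst h1; decide)

lemma pvHs1 : ∀ p ∈ (["N","2","j","Z","S","D","T","9","g","w","h","z","s","v","f","r","l","n","m","k","d","t","b","p"] : List String), ∃ d, p.toList = [d] := by
  intro p hp; fin_cases hp <;> exact ⟨_, rfl⟩
lemma pvHs2 : ∀ p ∈ (["@","U","0","V","&","e","I","3","u","O","A","i"] : List String), ∃ d, p.toList = [d] := by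
  intro p hp; fin_cases hp <;> exact ⟨_, rfl⟩
lemma pvHd1 : ∀ p ∈ (["dZ","tS"] : List String), ∃ d e, p.toList = [d, e] := by
  intro p hp; fin_cases hp <;> exact ⟨_, _, rfl⟩
lemma pvHd2 : ∀ p ∈ (["u@","e@","I@","aU","@U","oI","aI","eI"] : List String), ∃ d e, p.toList = [d, e] := by
  intro p hp; fin_cases hp <;> exact ⟨_, _, rfl⟩

lemma pvStep_nil (l : List Char) (a : Nat) (c : Char) (h : l.drop a = [c]) :
    pvFind pvS l a = if String.ofList [c] ∈ pvOne then some (String.ofList [c]) else none := by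
  rw [pvS_eval, pvFind_append, pvFind_append, pvFind_append]
  rw [pvFind_doubles_nil _ pvHd1 l a c h, pvFind_doubles_nil _ pvHd2 l a c h,
      pvFind_singles _ pvHs1 l a c [] h, pvFind_singles _ pvHs2 l a c [] h]
  by_cases m1 : String.ofList [c] ∈ (["N","2","j","Z","S","D","T","9","g","w","h","z","s","v","f","r","l","n","m","k","d","t","b","p"] : List String) <;>
    by_cases m2 : String.ofList [c] ∈ (["@","U","0","V","&","e","I","3","u","O","A","i"] : List String) <;>
      simp [m1, m2, mem_pvOne_iff, Option.orElse]

lemma pvStep_cons (l : List Char) (a : Nat) (c c2 : Char) (t : List Char) (h : l.drop a = c :: c2 :: t) :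
    pvFind pvS l a =
      (if String.ofList [c, c2] ∈ pvTwo then some (String.ofList [c, c2])
       else if String.ofList [c] ∈ pvOne then some (String.ofList [c]) else none) := by
  rw [pvS_eval, pvFind_append, pvFind_append, pvFind_append]
  rw [pvFind_doubles _ pvHd1 l a c c2 t h, pvFind_doubles _ pvHd2 l a c c2 t h,
      pvFind_singles _ pvHs1 l a c (c2 :: t) h, pvFind_singles _ pvHs2 l a c (c2 :: t) h]
  by_cases d1 : String.ofList [c, c2] ∈ (["dZ","tS"] : List String)
  · simp [d1, mem_pvTwo_iff, Option.orElse]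
  · by_cases d2 : String.ofList [c, c2] ∈ (["u@","e@","I@","aU","@U","oI","aI","eI"] : List String)
    · have hdisj := pvDisj c c2 d2
      simp [d1, d2, hdisj, mem_pvTwo_iff, Option.orElse]
    · by_cases m1 : String.ofList [c] ∈ (["N","2","j","Z","S","D","T","9","g","w","h","z","s","v","f","r","l","n","m","k","d","t","b","p"] : List String) <;>
        by_cases m2 : String.ofList [c] ∈ (["@","U","0","V","&","e","I","3","u","O","A","i"] : List String) <;>
          simp [d1, d2, m1, m2, mem_pvTwo_iff, mem_pvOne_iff, Option.orElse]

lemma pvMain (n : Nat) : ∀ (l : List Char) (a : Nat) (acc : List String), l.length - a = n →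
    pvLoopA l a acc = acc ++ pvGoB (l.drop a) := by
  induction n using Nat.strong_induction_on with
  | _ n ih =>
    intro l a acc hn
    rw [pvLoopA]
    by_cases h : a < l.length
    · have hlen : (l.drop a).length = l.length - a := List.length_drop ..
      obtain ⟨c, t, hct⟩ : ∃ c t, l.drop a = c :: t := by
        cases hd : l.drop a with
        | nil => rw [hd] at hlen; simp at hlen; omega
        | cons c t => exact ⟨c, t, rfl⟩
      have hdrop1 : l.drop (a + 1) = t := by
        have h1 : l.drop (a + 1) = (l.drop a).drop 1 := by rw [List.drop_drop]
        rw [h1, hct]; rfl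
      simp only [h, dif_pos]
      rw [hct]
      cases t with
      | nil =>
        have hstep := pvStep_nil l a c hct
        rw [pvGoB]
        split
        · rename_i phlet hm
          rw [hstep] at hm
          by_cases m : String.ofList [c] ∈ pvOne
          · rw [if_pos m] at hm
            obtain rfl : phlet = String.ofList [c] := by simpa using hm.symm
            rw [ih (l.length - (a + (String.ofList [c]).toList.length)) (by simp; omega) l _ _ rfl]
            rw [show a + (String.ofList [c]).toList.length = a + 1 by simp]
            rw [hdrop1]
            simp [pvGoB, m]
          · simp [m] at hm
        · rename_i hm
          rw [hstep] at hm
          by_cases m : String.ofList [c] ∈ pvOne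
          · simp [m] at hm
          · rw [ih (l.length - (a + 1)) (by omega) l _ _ rfl, hdrop1]
            simp [pvGoB, m]
      | cons c2 t' =>
        have hstep := pvStep_cons l a c c2 t' hct
        have hdrop2 : l.drop (a + 2) = t' := by
          have h2 : l.drop (a + 2) = (l.drop a).drop 2 := by rw [List.drop_drop]
          rw [h2, hct]; rfl
        rw [pvGoB]
        split
        · rename_i phlet hm
          rw [hstep] at hm
          by_cases m2 : String.ofList [c, c2] ∈ pvTwo
          · rw [if_pos m2] at hm
            obtain rfl : phlet = String.ofList [c, c2] := by simpa using hm.symm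
            rw [ih (l.length - (a + (String.ofList [c, c2]).toList.length)) (by simp; omega) l _ _ rfl]
            rw [show a + (String.ofList [c, c2]).toList.length = a + 2 by simp]
            rw [hdrop2]
            simp [m2]
          · by_cases m1 : String.ofList [c] ∈ pvOne
            · rw [if_neg m2, if_pos m1] at hm
              obtain rfl : phlet = String.ofList [c] := by simpa using hm.symm
              rw [ih (l.length - (a + (String.ofList [c]).toList.length)) (by simp; omega) l _ _ rfl]
              rw [show a + (String.ofList [c]).toList.length = a + 1 by simp]
              rw [hdrop1]
              simp [m2, m1]
            · simp [m2, m1] at hm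
        · rename_i hm
          rw [hstep] at hm
          by_cases m2 : String.ofList [c, c2] ∈ pvTwo
          · simp [m2] at hm
          · by_cases m1 : String.ofList [c] ∈ pvOne
            · simp [m2, m1] at hm
            · rw [ih (l.length - (a + 1)) (by omega) l _ _ rfl, hdrop1]
              simp [m2, m1]
    · have hnil : l.drop a = [] := by
        apply List.drop_eq_nil_of_le; omega
      rw [hnil, dif_neg h]
      simp [pvGoB]

-- ===== VERDICT (by name: the statement is the Claim_ definition above) =====
theorem phletting_spec : Claim_equal_phletting := by
  intro phsyl _
  unfold Spec_phletting phletting phletting_alt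
  have h := pvMain (phsyl.toList.length - 0) phsyl.toList 0 [] rfl
  simpa using h
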